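-- pv_equiv track=rewrite | github.com/abev-crypto/DotImporter | Convert/utils.py | split_poly_at_anchors
-- ===== SOURCE A (Python) =====
-- def split_poly_at_anchors(poly_idx, anchors_set):
--     out=[]; cur=[poly_idx[0]]
--     for i in range(1,len(poly_idx)):
--         idx=poly_idx[i]; cur.append(idx)
--         if idx in anchors_set:
--             if len(cur)>=2: out.append(cur)
--             cur=[idx]
--     if len(cur)>=2: out.append(cur)
--     return out
-- ===== SOURCE B (Python) =====
-- def split_poly_at_anchors(poly_idx, anchors_set):
--     n = len(poly_idx)
--     cuts = [i for i in range(1, n) if poly_idx[i] in anchors_set]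
--     out = []
--     start = 0
--     for p in cuts:
--         out.append(list(poly_idx[start:p + 1]))
--         start = p
--     tail = list(poly_idx[start:])
--     if len(tail) >= 2:
--         out.append(tail)
--     return out
-- ===== Notes on version B (the rewrite author's own statement) =====
-- stated objective: alternative
-- what changed: Replaces the incremental accumulator (growing cur list reset at each anchor) by a two-pass scheme: first collect the cut positions, then emit each segment as a slice poly_idx[start:p+1]; the tail segment is a final slice.
import Mathlib
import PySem

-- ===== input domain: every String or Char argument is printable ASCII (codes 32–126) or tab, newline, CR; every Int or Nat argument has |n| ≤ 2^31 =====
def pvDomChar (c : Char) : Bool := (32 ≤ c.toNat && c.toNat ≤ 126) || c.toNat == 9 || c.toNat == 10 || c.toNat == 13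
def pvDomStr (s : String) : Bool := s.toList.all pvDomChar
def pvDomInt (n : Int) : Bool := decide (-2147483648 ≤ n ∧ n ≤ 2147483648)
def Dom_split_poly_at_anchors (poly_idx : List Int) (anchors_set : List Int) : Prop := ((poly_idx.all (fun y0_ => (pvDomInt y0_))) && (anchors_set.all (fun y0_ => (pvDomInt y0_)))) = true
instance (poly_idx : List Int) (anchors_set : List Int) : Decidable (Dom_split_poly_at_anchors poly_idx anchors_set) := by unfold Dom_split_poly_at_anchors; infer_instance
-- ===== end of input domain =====

-- B replaces A's incremental accumulator by a two-pass scheme (collect cut positions, then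
-- slice out the segments); same return value on every nonempty poly_idx (objective: alternative).

-- ===== PORT A =====
-- loop body of A: idx = poly_idx[i]; cur.append(idx); if idx in anchors_set: flush cur, cur=[idx]
def pvStepA (anchors_set : List Int) (poly_idx : List Int)
    (st : List (List Int) × List Int) (i : Int) : List (List Int) × List Int :=
  let idx := PySem.List.pyGetD poly_idx i 0
  let cur := st.2 ++ [idx]
  if idx ∈ anchors_set then
    (if 2 ≤ cur.length then st.1 ++ [cur] else st.1, [idx])
  else (st.1, cur)

def split_poly_at_anchors (poly_idx : List Int) (anchors_set : List Int) : List (List Int) :=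
  let s := (PySem.List.pyRange 1 (poly_idx.length : Int) 1).foldl (pvStepA anchors_set poly_idx)
    ([], [PySem.List.pyGetD poly_idx 0 0])
  if 2 ≤ s.2.length then s.1 ++ [s.2] else s.1

-- ===== PORT B =====
-- loop body of B: out.append(list(poly_idx[start:p+1])); start = p
def pvStepB (poly_idx : List Int) (st : List (List Int) × Int) (p : Int) : List (List Int) × Int :=
  (st.1 ++ [PySem.List.slice poly_idx (some st.2) (some (p + 1))], p)

def split_poly_at_anchors_alt (poly_idx : List Int) (anchors_set : List Int) : List (List Int) :=
  let cuts := (PySem.List.pyRange 1 (poly_idx.length : Int) 1).filter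
    (fun i => decide (PySem.List.pyGetD poly_idx i 0 ∈ anchors_set))
  let s := cuts.foldl (pvStepB poly_idx) ([], 0)
  let tail := PySem.List.slice poly_idx (some s.2) none
  if 2 ≤ tail.length then s.1 ++ [tail] else s.1

-- ===== PRECONDITION & SPEC =====
-- Python A evaluates poly_idx[0] first, so it raises IndexError on empty poly_idx; Pre_ excludes exactly that.
def Pre_split_poly_at_anchors (poly_idx : List Int) (anchors_set : List Int) : Prop := poly_idx ≠ []
instance (poly_idx : List Int) (anchors_set : List Int) : Decidable (Pre_split_poly_at_anchors poly_idx anchors_set) := by unfold Pre_split_poly_at_anchors; infer_instance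
def pvWitness_split_poly_at_anchors : List Int × List Int := ([1, 2, 3, 2, 4], [2])


def Spec_split_poly_at_anchors (poly_idx : List Int) (anchors_set : List Int) (out : List (List Int)) : Prop := out = split_poly_at_anchors_alt poly_idx anchors_set
instance (poly_idx : List Int) (anchors_set : List Int) (out : List (List Int)) : Decidable (Spec_split_poly_at_anchors poly_idx anchors_set out) := by unfold Spec_split_poly_at_anchors; infer_instance

-- ===== CLAIM (what is proved, stated in full; the proofs are below) =====
def Claim_equal_split_poly_at_anchors : Prop := ∀ (poly_idx : List Int) (anchors_set : List Int), Dom_split_poly_at_anchors poly_idx anchors_set → Pre_split_poly_at_anchors poly_idx anchors_set → Spec_split_poly_at_anchors poly_idx anchors_set (split_poly_at_anchors poly_idx anchors_set)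

-- ===== LEMMAS AND PROOFS =====

-- Invariant: at index j with last cut at `start` (start < j ≤ n), A's live accumulator is
-- the slice poly_idx[start:j]; finishing A's loop from there equals finishing B's slice loop.
lemma pv_main (poly_idx anchors_set : List Int) :
    ∀ (k j start : Nat) (out : List (List Int)),
      poly_idx.length - j = k → start < j → j ≤ poly_idx.length →
      (let s := (PySem.List.pyRange (j : Int) (poly_idx.length : Int) 1).foldl
          (pvStepA anchors_set poly_idx) (out, (poly_idx.drop start).take (j - start));
       if 2 ≤ s.2.length then s.1 ++ [s.2] else s.1)
      =
      (let s := ((PySem.List.pyRange (j : Int) (poly_idx.length : Int) 1).filter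
          (fun i => decide (PySem.List.pyGetD poly_idx i 0 ∈ anchors_set))).foldl
          (pvStepB poly_idx) (out, (start : Int));
       if 2 ≤ (PySem.List.slice poly_idx (some s.2) none).length then
         s.1 ++ [PySem.List.slice poly_idx (some s.2) none] else s.1) := by
  intro k
  induction k with
  | zero =>
    intro j start out hk hsj hjn
    have hj : j = poly_idx.length := by omega
    subst hj
    rw [PySem.List.pyRange_one_eq_nil le_rfl]
    simp only [List.filter_nil, List.foldl_nil]
    have h1 : (poly_idx.drop start).take (poly_idx.length - start) = poly_idx.drop start :=
      List.take_of_length_le (by simp)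
    rw [h1, PySem.List.slice_from_natCast]
  | succ k ih =>
    intro j start out hk hsj hjn
    have hjlt : j < poly_idx.length := by omega
    have hcast : ((j : Int)) < (poly_idx.length : Int) := by exact_mod_cast hjlt
    rw [PySem.List.pyRange_one_cons hcast]
    have hcast2 : ((j : Int) + 1) = (((j + 1 : Nat)) : Int) := by push_cast; ring
    rw [hcast2]
    have hget : PySem.List.pyGetD poly_idx (j : Int) 0 = poly_idx[j] := by
      rw [PySem.List.pyGetD_natCast, List.getD_eq_getElem?_getD, List.getElem?_eq_getElem hjlt]
      rfl
    have hcur : (poly_idx.drop start).take (j - start) ++ [poly_idx[j]] =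
        (poly_idx.drop start).take (j + 1 - start) := by
      have h1 : j + 1 - start = (j - start) + 1 := by omega
      rw [h1, List.take_add_one]
      congr 1
      rw [List.getElem?_drop]
      have h2 : start + (j - start) = j := by omega
      rw [h2, List.getElem?_eq_getElem hjlt]
      rfl
    simp only [List.filter_cons, List.foldl_cons]
    by_cases hmem : poly_idx[j] ∈ anchors_set
    · have hlen2 : 2 ≤ ((poly_idx.drop start).take (j + 1 - start)).length := by
        simp [List.length_take, List.length_drop]
        omega
      have hA : pvStepA anchors_set poly_idx
          (out, (poly_idx.drop start).take (j - start)) (j : Int)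
          = (out ++ [(poly_idx.drop start).take (j + 1 - start)],
             (poly_idx.drop j).take (j + 1 - j)) := by
        simp only [pvStepA, hget, hcur]
        rw [if_pos hmem, if_pos hlen2]
        have hj1 : j + 1 - j = 1 := by omega
        rw [hj1]
        have hdj : poly_idx.drop j = poly_idx[j] :: poly_idx.drop (j + 1) :=
          List.drop_eq_getElem_cons hjlt
        rw [hdj]
        rfl
      have hB : pvStepB poly_idx (out, (start : Int)) ((j : Nat) : Int)
          = (out ++ [(poly_idx.drop start).take (j + 1 - start)], ((j : Nat) : Int)) := by
        simp only [pvStepB, hcast2, PySem.List.slice_natCast]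
      rw [hget]
      simp only [hmem, decide_true, if_true, List.foldl_cons, hA, hB]
      exact ih (j + 1) j (out ++ [(poly_idx.drop start).take (j + 1 - start)])
        (by omega) (by omega) (by omega)
    · have hA : pvStepA anchors_set poly_idx
          (out, (poly_idx.drop start).take (j - start)) (j : Int)
          = (out, (poly_idx.drop start).take (j + 1 - start)) := by
        simp only [pvStepA, hget, hcur]
        rw [if_neg hmem]
      rw [hget]
      simp only [hmem, decide_false, hA]
      exact ih (j + 1) start out (by omega) (by omega) (by omega)

-- ===== VERDICT (by name: the statement is the Claim_ definition above) =====
theorem split_poly_at_anchors_spec : Claim_equal_split_poly_at_anchors := by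
  intro poly_idx anchors_set _ hpre
  unfold Spec_split_poly_at_anchors split_poly_at_anchors split_poly_at_anchors_alt
  have hlen : 1 ≤ poly_idx.length := List.length_pos_of_ne_nil hpre
  have hinit : [PySem.List.pyGetD poly_idx 0 0] = (poly_idx.drop 0).take (1 - 0) := by
    cases poly_idx with
    | nil => exact absurd rfl hpre
    | cons x xs =>
      have h0 : (0 : Int) = ((0 : Nat) : Int) := by norm_num
      rw [h0, PySem.List.pyGetD_natCast]
      rfl
  have h := pv_main poly_idx anchors_set (poly_idx.length - 1) 1 0 [] (by omega) (by omega) hlen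
  simp only [Nat.cast_one, Nat.cast_zero, Nat.sub_zero] at h
  rw [hinit]
  exact h
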